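-- pv_equiv track=rewrite | github.com/yshurhay/Homework | homework-11/task_2.py | moving
-- ===== SOURCE A (Python) =====
-- def check_moves(moves):
--     if not moves.isalpha():
--         return TypeError('Moves must have only letters')
--     if not moves.isupper():
--         return Exception('Moves must have only upper letters')
--     if not set(moves) <= {'S', 'W', 'N', 'E'}:
--         return Exception('Moves must have only S W N E letters')
--     return False
--
-- def moving(moves: str, start_coordinates: tuple) -> tuple or Exception:
--     if check_moves(moves):
--         return check_moves(moves)
--
--     x, y = start_coordinates
--
--     for move in moves:
--         match move:
--             case 'S':
--                 y -= 1
--             case 'N':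
--                 y += 1
--             case 'W':
--                 x -= 1
--             case 'E':
--                 x += 1
--
--     return x, y
-- ===== SOURCE B (Python) =====
-- def check_moves(moves):
--     if not moves.isalpha():
--         return TypeError('Moves must have only letters')
--     if not moves.isupper():
--         return Exception('Moves must have only upper letters')
--     if not set(moves) <= {'S', 'W', 'N', 'E'}:
--         return Exception('Moves must have only S W N E letters')
--     return False
--
-- def moving(moves: str, start_coordinates: tuple) -> tuple or Exception:
--     if check_moves(moves):
--         return check_moves(moves)
--     x, y = start_coordinates
--     # moves are order-independent: the final point is the start plus net tallies
--     return (x + moves.count('E') - moves.count('W'),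
--             y + moves.count('N') - moves.count('S'))
-- ===== Notes on version B (the rewrite author's own statement) =====
-- stated objective: simpler
-- what changed: The sequential per-character state-update loop (match on each move) is replaced by an order-independent closed form: the result is the start plus net counts of E/W and N/S.
import Mathlib
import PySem

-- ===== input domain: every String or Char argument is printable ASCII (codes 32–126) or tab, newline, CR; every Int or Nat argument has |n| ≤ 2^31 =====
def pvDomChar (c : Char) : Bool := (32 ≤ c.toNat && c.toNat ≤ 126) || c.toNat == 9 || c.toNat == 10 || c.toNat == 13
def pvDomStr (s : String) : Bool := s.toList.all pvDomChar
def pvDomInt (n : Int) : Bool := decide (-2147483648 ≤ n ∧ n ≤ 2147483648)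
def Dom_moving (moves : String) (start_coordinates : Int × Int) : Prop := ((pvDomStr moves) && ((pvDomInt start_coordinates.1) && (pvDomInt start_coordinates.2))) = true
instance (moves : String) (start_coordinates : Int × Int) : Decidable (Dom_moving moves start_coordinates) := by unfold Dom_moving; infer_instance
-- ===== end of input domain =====

-- B replaces the per-character state-update loop by order-independent net move counts (objective: simpler).

-- ===== PORT A =====
-- check_moves returns an exception OBJECT (truthy) on invalid input and False otherwise;
-- the port returns true exactly when the Python returns one of the exception objects.
-- moves.isupper(): only evaluated after moves.isalpha() succeeded, where (ASCII domain, every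
-- char cased) it equals "every character is an uppercase letter" — ported by hand as such;
-- exact whenever the branch's value is reached.
def checkMoves (moves : String) : Bool :=
  if !(PySem.Str.strIsalpha moves) then true
  else if !(moves.toList.all PySem.Chars.isupper) then true
  else if !(PySem.Set.issubset (PySem.Set.ofList moves.toList) ['S', 'W', 'N', 'E']) then true
  else false

def moving (moves : String) (start_coordinates : Int × Int) : Int × Int :=
  if checkMoves moves then
    start_coordinates  -- Python returns the exception object here (not an int pair); excluded by Pre_moving
  else
    moves.toList.foldl
      (fun (p : Int × Int) move =>
        if move = 'S' then (p.1, p.2 - 1)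
        else if move = 'N' then (p.1, p.2 + 1)
        else if move = 'W' then (p.1 - 1, p.2)
        else if move = 'E' then (p.1 + 1, p.2)
        else p)
      start_coordinates

-- ===== PORT B =====
-- Source B's check_moves is byte-identical to A's, so the port shares `checkMoves` above.
-- moves.count(c) for a single character c is ported by hand as List.count on the characters
-- (exact: counting occurrences of a one-character substring = counting that character).
def moving_alt (moves : String) (start_coordinates : Int × Int) : Int × Int :=
  if checkMoves moves then
    start_coordinates  -- Python returns the exception object here; excluded by Pre_moving
  else
    (start_coordinates.1 + (moves.toList.count 'E' : Int) - (moves.toList.count 'W' : Int),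
     start_coordinates.2 + (moves.toList.count 'N' : Int) - (moves.toList.count 'S' : Int))

-- ===== PRECONDITION & SPEC =====
-- Pre_ excludes exactly the inputs on which the Python `moving` returns an exception object
-- instead of an int pair: empty moves or any character outside S/W/N/E.
def Pre_moving (moves : String) (start_coordinates : Int × Int) : Prop :=
  (!moves.toList.isEmpty
    && moves.toList.all (fun c => c ∈ (['S', 'W', 'N', 'E'] : List Char))) = true
instance (moves : String) (start_coordinates : Int × Int) : Decidable (Pre_moving moves start_coordinates) := by unfold Pre_moving; infer_instance
def pvWitness_moving : String × (Int × Int) := ("N", (0, 0))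

def Spec_moving (moves : String) (start_coordinates : Int × Int) (out : Int × Int) : Prop := out = moving_alt moves start_coordinates
instance (moves : String) (start_coordinates : Int × Int) (out : Int × Int) : Decidable (Spec_moving moves start_coordinates out) := by unfold Spec_moving; infer_instance

-- ===== CLAIM (what is proved, stated in full; the proofs are below) =====
def Claim_equal_moving : Prop := ∀ (moves : String) (start_coordinates : Int × Int), Dom_moving moves start_coordinates → Pre_moving moves start_coordinates → Spec_moving moves start_coordinates (moving moves start_coordinates)

-- ===== LEMMAS AND PROOFS =====

-- The stateful walk equals the net-count closed form, for ANY character list.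
theorem fold_eq_counts (cs : List Char) (x y : Int) :
    cs.foldl
      (fun (p : Int × Int) move =>
        if move = 'S' then (p.1, p.2 - 1)
        else if move = 'N' then (p.1, p.2 + 1)
        else if move = 'W' then (p.1 - 1, p.2)
        else if move = 'E' then (p.1 + 1, p.2)
        else p)
      (x, y)
    = (x + (cs.count 'E' : Int) - (cs.count 'W' : Int),
       y + (cs.count 'N' : Int) - (cs.count 'S' : Int)) := by
  induction cs generalizing x y with
  | nil => simp
  | cons c cs ih =>
    simp only [List.foldl_cons, List.count_cons]
    split_ifs with h1 h2 h3 h4 <;>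
      simp_all [ih] <;> omega


-- Under Pre_, the validation passes (check_moves returns False).
theorem checkMoves_false_of_pre (moves : String) (h1 : moves.toList ≠ [])
    (h2 : ∀ c ∈ moves.toList, c ∈ (['S', 'W', 'N', 'E'] : List Char)) :
    checkMoves moves = false := by
  have halpha : PySem.Str.strIsalpha moves = true := by
    simp [PySem.Str.strIsalpha, PySem.Chars.strIsalpha, h1]
    intro c hc
    have := h2 c hc; simp at this
    rcases this with rfl | rfl | rfl | rfl <;> decide
  have hupper : moves.toList.all PySem.Chars.isupper = true := by
    simp only [List.all_eq_true]
    intro c hc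
    have := h2 c hc; simp at this
    rcases this with rfl | rfl | rfl | rfl <;> decide
  have hsub : PySem.Set.issubset (PySem.Set.ofList moves.toList)
      (['S', 'W', 'N', 'E'] : List Char) = true := by
    rw [PySem.Set.issubset_iff]
    intro c hc
    exact h2 c ((PySem.Set.mem_ofList (xs := moves.toList) c).mp hc)
  have halpha' : PySem.Chars.strIsalpha moves.toList = true := by
    simpa [PySem.Str.strIsalpha] using halpha
  simp [checkMoves, PySem.Str.strIsalpha, halpha', hupper, hsub]

theorem moving_spec_aux (moves : String) (sc : Int × Int)
    (hpre : Pre_moving moves sc) : moving moves sc = moving_alt moves sc := by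
  obtain ⟨x, y⟩ := sc
  rw [Pre_moving, Bool.and_eq_true, Bool.not_eq_eq_eq_not, Bool.not_true,
    List.isEmpty_eq_false_iff, List.all_eq_true] at hpre
  obtain ⟨h1, h2⟩ := hpre
  have hc := checkMoves_false_of_pre moves h1 (fun c hc => by simpa using h2 c hc)
  unfold moving moving_alt
  rw [hc]
  simpa using fold_eq_counts moves.toList x y

-- ===== VERDICT (by name: the statement is the Claim_ definition above) =====
theorem moving_spec : Claim_equal_moving := by
  intro moves sc _ hpre
  exact moving_spec_aux moves sc hpre
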